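-- pv_equiv track=rewrite | github.com/jarndejong/ATsimulations | utils/messageencoding.py | encode_message_to_bits
-- ===== SOURCE A (Python) =====
-- def encode_message_to_bits(message: str, total_bits: int) -> list[int]:
--     """Encodes a string into a fixed-length list of bits (0s and 1s)."""
--     # Convert string to bytes
--     byte_data = message.encode('utf-8')
--     required_bits = len(byte_data) * 8
--
--     if required_bits > total_bits:
--         raise ValueError("Message too long to fit in the specified number of bits.")
--
--     # Convert each byte to 8 bits
--     bits = []
--     for byte in byte_data:
--         bits.extend([(byte >> i) & 1 for i in reversed(range(8))])
--
--     # Pad with zeros if necessary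
--     padding = total_bits - required_bits
--     bits.extend([0] * padding)
--
--     return bits
-- ===== SOURCE B (Python) =====
-- def encode_message_to_bits(message: str, total_bits: int) -> list[int]:
--     """Encodes a string into a fixed-length list of bits (0s and 1s)."""
--     byte_data = message.encode('utf-8')
--     required_bits = len(byte_data) * 8
--
--     if required_bits > total_bits:
--         raise ValueError("Message too long to fit in the specified number of bits.")
--
--     # Build the answer back-to-front: padding zeros first, then the bytes in
--     # reversed order, each byte peeled LSB-first; one final reverse.
--     bits = [0] * (total_bits - required_bits)
--     for byte in reversed(byte_data):
--         for _ in range(8):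
--             bits.append(byte & 1)
--             byte >>= 1
--     bits.reverse()
--     return bits
-- ===== Notes on version B (the rewrite author's own statement) =====
-- stated objective: alternative
-- what changed: Builds the bit list back-to-front: the zero padding goes in first, the bytes are traversed in reversed order with each byte peeled LSB-first by a mutating shift accumulator, and one final reverse restores the order, instead of A's forward loop extending with an 8-element MSB-first comprehension per byte and appending the padding last.
import Mathlib
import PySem

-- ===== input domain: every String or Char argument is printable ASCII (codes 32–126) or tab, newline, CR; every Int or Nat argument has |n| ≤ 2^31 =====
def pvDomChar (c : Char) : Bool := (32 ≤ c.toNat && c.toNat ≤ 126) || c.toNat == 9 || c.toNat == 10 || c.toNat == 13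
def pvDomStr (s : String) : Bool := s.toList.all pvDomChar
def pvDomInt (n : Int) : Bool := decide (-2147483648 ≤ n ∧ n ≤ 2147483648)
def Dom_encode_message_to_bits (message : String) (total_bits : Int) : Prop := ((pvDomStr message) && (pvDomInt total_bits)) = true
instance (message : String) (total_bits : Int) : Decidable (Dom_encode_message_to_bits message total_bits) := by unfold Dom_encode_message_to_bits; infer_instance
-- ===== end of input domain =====

-- B builds the list back-to-front: padding first, bytes in reversed order peeled
-- LSB-first by a shifting accumulator, one final reverse; objective: alternative, same cost.
-- On the ASCII domain, message.encode('utf-8') is the list of character codes.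

-- ===== PORT A =====
def encode_message_to_bits (message : String) (total_bits : Int) : List Int :=
  let byte_data : List Nat := message.toList.map (fun c => c.toNat)
  let required_bits : Int := (byte_data.length : Int) * 8
  -- for byte in byte_data: bits.extend([(byte >> i) & 1 for i in reversed(range(8))])
  let bits : List Int :=
    byte_data.foldl (fun acc byte =>
      acc ++ (List.range 8).reverse.map (fun i => (((byte >>> i) &&& 1 : Nat) : Int))) []
  bits ++ List.replicate (total_bits - required_bits).toNat 0

-- ===== PORT B =====
-- the inner loop 'for _ in range(k): bits.append(byte & 1); byte >>= 1'
def pvPeelBits : Nat → Nat → List Int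
  | 0, _ => []
  | k + 1, byte => (((byte &&& 1 : Nat) : Int)) :: pvPeelBits k (byte >>> 1)

def encode_message_to_bits_alt (message : String) (total_bits : Int) : List Int :=
  let byte_data : List Nat := message.toList.map (fun c => c.toNat)
  let required_bits : Int := (byte_data.length : Int) * 8
  -- bits = [0]*(total_bits - required_bits); for byte in reversed(byte_data): peel 8 bits
  let bits : List Int :=
    byte_data.reverse.foldl (fun acc byte => acc ++ pvPeelBits 8 byte)
      (List.replicate (total_bits - required_bits).toNat 0)
  bits.reverse

-- ===== PRECONDITION & SPEC =====
-- Pre_ excludes exactly the inputs where both Pythons raise ValueError (message too long).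
def Pre_encode_message_to_bits (message : String) (total_bits : Int) : Prop :=
  (message.toList.length : Int) * 8 ≤ total_bits
instance (message : String) (total_bits : Int) : Decidable (Pre_encode_message_to_bits message total_bits) := by unfold Pre_encode_message_to_bits; infer_instance
def pvWitness_encode_message_to_bits : String × Int := ("hi", 20)

def Spec_encode_message_to_bits (message : String) (total_bits : Int) (out : List Int) : Prop := out = encode_message_to_bits_alt message total_bits
instance (message : String) (total_bits : Int) (out : List Int) : Decidable (Spec_encode_message_to_bits message total_bits out) := by unfold Spec_encode_message_to_bits; infer_instance

-- ===== CLAIM (what is proved, stated in full; the proofs are below) =====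
def Claim_equal_encode_message_to_bits : Prop := ∀ (message : String) (total_bits : Int), Dom_encode_message_to_bits message total_bits → Pre_encode_message_to_bits message total_bits → Spec_encode_message_to_bits message total_bits (encode_message_to_bits message total_bits)

-- ===== LEMMAS AND PROOFS =====

-- folding list-append from any initial accumulator is the accumulator ++ flatMap
theorem pv_foldl_append {α : Type} (g : α → List Int) (l : List α) :
    ∀ init : List Int, l.foldl (fun acc x => acc ++ g x) init = init ++ l.flatMap g := by
  induction l with
  | nil => intro init; simp
  | cons x xs ih => intro init; simp [List.foldl_cons, ih, List.flatMap_cons]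

-- the peel loop lists the k low bits of byte LSB-first
theorem pv_peel_eq (k : Nat) : ∀ byte, pvPeelBits k byte
    = (List.range k).map (fun i => (((byte >>> i) &&& 1 : Nat) : Int)) := by
  induction k with
  | zero => intro byte; simp [pvPeelBits]
  | succ k ih =>
    intro byte
    rw [List.range_succ_eq_map]
    simp only [pvPeelBits, ih, List.map_cons, List.map_map]
    congr 1
    apply List.map_congr_left
    intro i _
    simp only [Function.comp_apply]
    rw [← Nat.shiftRight_add, Nat.add_comm]

-- ===== VERDICT (by name: the statement is the Claim_ definition above) =====
theorem encode_message_to_bits_spec : Claim_equal_encode_message_to_bits := by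
  intro message total_bits _ _
  unfold Spec_encode_message_to_bits encode_message_to_bits encode_message_to_bits_alt
  dsimp only
  set bs := message.toList.map (fun c => c.toNat) with hbs
  rw [pv_foldl_append, pv_foldl_append, List.nil_append, List.reverse_append,
    List.reverse_replicate]
  congr 1
  · -- reversed flatMap of LSB-first peels = forward flatMap of MSB-first bit lists
    rw [List.reverse_flatMap, List.reverse_reverse]
    apply List.flatMap_congr  -- pointwise: (pvPeelBits 8 b).reverse = MSB-first 8 bits of b
    intro b _
    simp only [Function.comp_apply, pv_peel_eq, List.map_reverse]
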